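-- pv_equiv track=rewrite | github.com/xinyi-han/leetcode | 213-House-Robber-II.py | circleRob
-- ===== SOURCE A (Python) =====
-- from typing import List
--
-- def circleRob(nums: List[int]) -> int:
--     cache = [0 for _ in range(len(nums) + 1)]
--     houses = [set() for _ in range(len(nums) + 1)]
--     cache[1] = nums[0]
--     houses[1].add(0)
--     for i, num in enumerate(nums[1:], 1):
--         if i == len(nums) - 1:
--             if 0 in houses[i - 1]:
--                 cache[i + 1] = max(cache[i], cache[i - 1])
--             else:
--                 cache[i + 1] = max(cache[i], cache[i - 1] + num)
--         else:
--             if cache[i] >= cache[i - 1] + num: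
--                 cache[i + 1] = cache[i]
--                 houses[i + 1].update(houses[i])
--             else:
--                 cache[i + 1] = cache[i - 1] + num
--                 houses[i + 1].update(houses[i - 1])
--                 houses[i + 1].add(i)
--     return cache[-1]
-- ===== SOURCE B (Python) =====
-- from typing import List
--
-- def circleRob(nums: List[int]) -> int:
--     # Two staged passes: (1) fill the prefix DP table of values only; (2) backtrack
--     # through the finished table to decide whether house 0 is in the chosen set
--     # (a take-step is recognisable by a strict increase in the table).
--     m = len(nums)
--     if m == 1:
--         return nums[0]
--     cache = [0] * m
--     cache[1] = nums[0]
--     for i, num in enumerate(nums[1:-1], 1):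
--         cache[i + 1] = max(cache[i], cache[i - 1] + num)
--     k = m - 2
--     while k > 1:
--         k -= 2 if cache[k] > cache[k - 1] else 1
--     if k == 1:
--         return max(cache[m - 1], cache[m - 2])
--     return max(cache[m - 1], cache[m - 2] + nums[-1])
-- ===== Notes on version B (the rewrite author's own statement) =====
-- stated objective: faster
-- what changed: A does one forward pass that carries a full index-set per DP cell (copied/unioned every step) just to ask at the end whether house 0 was taken; B does two staged passes: it first fills the plain DP value table, then backtracks through the finished table (a take-step is exactly a strict increase) to recover whether house 0 was taken, so no sets exist at all.
import Mathlib
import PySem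

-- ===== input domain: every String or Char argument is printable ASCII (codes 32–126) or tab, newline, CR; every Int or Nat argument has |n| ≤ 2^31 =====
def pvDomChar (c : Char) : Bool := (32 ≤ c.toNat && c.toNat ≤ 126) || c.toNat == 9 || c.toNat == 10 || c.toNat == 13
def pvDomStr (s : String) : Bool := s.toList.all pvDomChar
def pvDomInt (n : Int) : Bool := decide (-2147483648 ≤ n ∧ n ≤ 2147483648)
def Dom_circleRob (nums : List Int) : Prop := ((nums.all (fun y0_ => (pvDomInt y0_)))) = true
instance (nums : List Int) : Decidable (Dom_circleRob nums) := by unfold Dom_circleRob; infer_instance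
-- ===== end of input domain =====

-- B replaces A's single forward pass carrying index-sets by two staged passes: fill the DP value
-- table, then backtrack through the finished table to decide whether house 0 was taken
-- (objective: faster — a strict table increase marks a take-step, so the set copying disappears).

-- ===== PORT A =====
-- one loop iteration of A: state = (cache, houses), item = (i, num) from enumerate(nums[1:], 1)
def circleRobStep (n : Int) (st : List Int × List (PySem.Set Int)) (p : Int × Int) :
    List Int × List (PySem.Set Int) :=
  let cache := st.1
  let houses := st.2
  let i := p.1
  let num := p.2
  if i = n - 1 then
    if PySem.Set.contains (PySem.List.pyGetD houses (i - 1) PySem.Set.empty) 0 then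
      (PySem.List.pySetD cache (i + 1)
        (max (PySem.List.pyGetD cache i 0) (PySem.List.pyGetD cache (i - 1) 0)), houses)
    else
      (PySem.List.pySetD cache (i + 1)
        (max (PySem.List.pyGetD cache i 0) (PySem.List.pyGetD cache (i - 1) 0 + num)), houses)
  else
    if PySem.List.pyGetD cache i 0 ≥ PySem.List.pyGetD cache (i - 1) 0 + num then
      (PySem.List.pySetD cache (i + 1) (PySem.List.pyGetD cache i 0),
       PySem.List.pySetD houses (i + 1)
         (PySem.Set.update (PySem.List.pyGetD houses (i + 1) PySem.Set.empty)
           (PySem.List.pyGetD houses i PySem.Set.empty)))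
    else
      (PySem.List.pySetD cache (i + 1) (PySem.List.pyGetD cache (i - 1) 0 + num),
       PySem.List.pySetD houses (i + 1)
         (PySem.Set.add
           (PySem.Set.update (PySem.List.pyGetD houses (i + 1) PySem.Set.empty)
             (PySem.List.pyGetD houses (i - 1) PySem.Set.empty)) i))

def circleRob (nums : List Int) : Int :=
  let cache : List Int := List.replicate (nums.length + 1) 0
  let houses : List (PySem.Set Int) := List.replicate (nums.length + 1) PySem.Set.empty
  let cache := PySem.List.pySetD cache 1 (PySem.List.pyGetD nums 0 0)  -- nums[0]; Pre_ excludes []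
  let houses := PySem.List.pySetD houses 1 (PySem.Set.add PySem.Set.empty 0)
  let st := (PySem.List.enumerate (PySem.List.slice nums (some 1) none) 1).foldl
              (circleRobStep (nums.length : Int)) (cache, houses)
  PySem.List.pyGetD st.1 (-1) 0

-- ===== PORT B =====
-- B's table-fill loop body: cache[i+1] = max(cache[i], cache[i-1] + num)
def circleRobFill (c : List Int) (p : Int × Int) : List Int :=
  PySem.List.pySetD c (p.1 + 1)
    (max (PySem.List.pyGetD c p.1 0) (PySem.List.pyGetD c (p.1 - 1) 0 + p.2))

-- B's backtrace while-loop (k stays ≥ 0 in Python, so it is recursion on Nat);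
-- returns true iff the loop exits with k == 1
def circleRobTrace (cache : List Int) : Nat → Bool
  | 0 => false
  | 1 => true
  | (k + 2) =>
      if PySem.List.pyGetD cache ((k : Int) + 2) 0 > PySem.List.pyGetD cache ((k : Int) + 1) 0 then
        circleRobTrace cache k
      else
        circleRobTrace cache (k + 1)

def circleRob_alt (nums : List Int) : Int :=
  let m := nums.length
  if m = 1 then PySem.List.pyGetD nums 0 0
  else
    let cache := PySem.List.pySetD (List.replicate m 0) 1 (PySem.List.pyGetD nums 0 0)
    let cache := (PySem.List.enumerate (PySem.List.slice nums (some 1) (some (-1))) 1).foldl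
                   circleRobFill cache
    if circleRobTrace cache (m - 2) then
      max (PySem.List.pyGetD cache ((m : Int) - 1) 0) (PySem.List.pyGetD cache ((m : Int) - 2) 0)
    else
      max (PySem.List.pyGetD cache ((m : Int) - 1) 0)
        (PySem.List.pyGetD cache ((m : Int) - 2) 0 + PySem.List.pyGetD nums (-1) 0)

-- ===== PRECONDITION & SPEC =====
-- Pre_ excludes only the empty list, on which Python A raises IndexError at nums[0] (B raises there too).
def Pre_circleRob (nums : List Int) : Prop := nums ≠ []
instance (nums : List Int) : Decidable (Pre_circleRob nums) := by unfold Pre_circleRob; infer_instance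
def pvWitness_circleRob : List Int := ([2, 3, 2] : List Int)

def Spec_circleRob (nums : List Int) (out : Int) : Prop := out = circleRob_alt nums
instance (nums : List Int) (out : Int) : Decidable (Spec_circleRob nums out) := by unfold Spec_circleRob; infer_instance

-- ===== CLAIM (what is proved, stated in full; the proofs are below) =====
def Claim_equal_circleRob : Prop := ∀ (nums : List Int), Dom_circleRob nums → Pre_circleRob nums → Spec_circleRob nums (circleRob nums)

-- ===== LEMMAS AND PROOFS =====

-- proof-side abstraction: the rolling state (prev2, prev, "0 used at prev2", "0 used at prev")
-- both ports are related to a fold of this step over the middle of the list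
def circleRobStepB (st : Int × Int × Bool × Bool) (num : Int) : Int × Int × Bool × Bool :=
  if st.2.1 ≥ st.1 + num then (st.2.1, st.2.1, st.2.2.2, st.2.2.2)
  else (st.2.1, st.1 + num, st.2.2.2, st.2.2.1)

theorem pv_getD_setD {α : Type} (xs : List α) (i j : Int) (v d : α)
    (hi0 : 0 ≤ i) (hi : i < xs.length) (hj0 : 0 ≤ j) :
    PySem.List.pyGetD (PySem.List.pySetD xs i v) j d =
      if j = i then v else PySem.List.pyGetD xs j d := by
  rw [PySem.List.pySetD_of_nonneg xs v hi0, PySem.List.pyGetD_of_nonneg _ d hj0,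
      PySem.List.pyGetD_of_nonneg xs d hj0]
  rcases eq_or_ne j i with h | h
  · subst h
    have : j.toNat < xs.length := by omega
    simp [List.getD_eq_getElem?_getD, this]
  · have hn : j.toNat ≠ i.toNat := by omega
    rw [if_neg h]
    simp [List.getD_eq_getElem?_getD, Ne.symm hn]

theorem pv_contains_update_nil (l : List Int) :
    PySem.Set.contains (PySem.Set.update PySem.Set.empty l) 0 = PySem.Set.contains l 0 := by
  rw [Bool.eq_iff_iff, PySem.Set.contains_iff, PySem.Set.contains_iff]
  rw [show (PySem.Set.empty : PySem.Set Int) = ([] : List Int) from rfl, PySem.Set.update_nil_left]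
  exact PySem.Set.mem_ofList l 0

theorem pv_contains_add_ne (s : PySem.Set Int) (i : Int) (h : i ≠ 0) :
    PySem.Set.contains (PySem.Set.add s i) 0 = PySem.Set.contains s 0 := by
  rw [Bool.eq_iff_iff, PySem.Set.contains_iff, PySem.Set.contains_iff, PySem.Set.mem_add]
  constructor
  · rintro (h0 | h0)
    · exact h0
    · exact absurd h0.symm h
  · exact Or.inl

-- A-side loop invariant: A's fold over enumerate(mid, i0) tracks the rolling state
theorem pv_loop_inv (N : Int) (mid : List Int) :
    ∀ (i0 : Int) (cache : List Int) (houses : List (PySem.Set Int)) (p2 p : Int) (z2 z : Bool),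
      1 ≤ i0 → i0 + mid.length = N - 1 →
      cache.length = N.toNat + 1 → houses.length = N.toNat + 1 →
      PySem.List.pyGetD cache (i0 - 1) 0 = p2 →
      PySem.List.pyGetD cache i0 0 = p →
      PySem.Set.contains (PySem.List.pyGetD houses (i0 - 1) PySem.Set.empty) 0 = z2 →
      PySem.Set.contains (PySem.List.pyGetD houses i0 PySem.Set.empty) 0 = z →
      (∀ j : Int, i0 < j → PySem.List.pyGetD houses j PySem.Set.empty = PySem.Set.empty) →
      ((PySem.List.enumerate mid i0).foldl (circleRobStep N) (cache, houses)).1.length = N.toNat + 1 ∧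
      PySem.List.pyGetD ((PySem.List.enumerate mid i0).foldl (circleRobStep N) (cache, houses)).1 (i0 + mid.length - 1) 0 = (mid.foldl circleRobStepB (p2, p, z2, z)).1 ∧
      PySem.List.pyGetD ((PySem.List.enumerate mid i0).foldl (circleRobStep N) (cache, houses)).1 (i0 + mid.length) 0 = (mid.foldl circleRobStepB (p2, p, z2, z)).2.1 ∧
      PySem.Set.contains (PySem.List.pyGetD ((PySem.List.enumerate mid i0).foldl (circleRobStep N) (cache, houses)).2 (i0 + mid.length - 1) PySem.Set.empty) 0 = (mid.foldl circleRobStepB (p2, p, z2, z)).2.2.1 := by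
  induction mid with
  | nil =>
    intro i0 cache houses p2 p z2 z h1 h2 hc hh g4 g5 g6 g7 hE
    simp only [PySem.List.enumerate_nil, List.foldl_nil, List.length_nil, Nat.cast_zero, add_zero]
    exact ⟨hc, g4, g5, g6⟩
  | cons m ms ih =>
    intro i0 cache houses p2 p z2 z h1 h2 hc hh g4 g5 g6 g7 hE
    have hne : ¬ (i0 = N - 1) := by
      rw [List.length_cons] at h2; push_cast at h2; omega
    have hrange : i0 + 1 < (cache.length : Int) := by
      rw [List.length_cons] at h2; push_cast at h2 ⊢; omega
    have hrangeH : i0 + 1 < (houses.length : Int) := by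
      rw [List.length_cons] at h2; push_cast at h2 ⊢; omega
    rw [PySem.List.enumerate_cons]
    simp only [List.foldl_cons]
    rw [show circleRobStep N (cache, houses) (i0, m) =
      (if PySem.List.pyGetD cache i0 0 ≥ PySem.List.pyGetD cache (i0-1) 0 + m then
        (PySem.List.pySetD cache (i0 + 1) (PySem.List.pyGetD cache i0 0),
         PySem.List.pySetD houses (i0 + 1)
           (PySem.Set.update (PySem.List.pyGetD houses (i0 + 1) PySem.Set.empty)
             (PySem.List.pyGetD houses i0 PySem.Set.empty)))
      else
        (PySem.List.pySetD cache (i0 + 1) (PySem.List.pyGetD cache (i0-1) 0 + m),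
         PySem.List.pySetD houses (i0 + 1)
           (PySem.Set.add
             (PySem.Set.update (PySem.List.pyGetD houses (i0 + 1) PySem.Set.empty)
               (PySem.List.pyGetD houses (i0-1) PySem.Set.empty)) i0))) from by
      simp [circleRobStep, hne]]
    rw [g4, g5]
    have hlen2 : (i0+1) + (ms.length : Int) = N - 1 := by
      rw [List.length_cons] at h2; push_cast at h2 ⊢; omega
    have hidx : i0 + (((m :: ms : List Int).length : Nat) : Int) = (i0+1) + (ms.length : Int) := by
      rw [List.length_cons]; push_cast; ring
    rw [hidx]
    have hEmpty1 : PySem.List.pyGetD houses (i0 + 1) PySem.Set.empty = PySem.Set.empty :=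
      hE (i0 + 1) (by omega)
    by_cases hcc : p ≥ p2 + m
    · rw [if_pos hcc,
        show circleRobStepB (p2, p, z2, z) m = (p, p, z, z) from by
          simp [circleRobStepB, hcc]]
      refine ih (i0+1) _ _ p p z z (by omega) hlen2 ?_ ?_ ?_ ?_ ?_ ?_ ?_
      · rw [PySem.List.length_pySetD]; exact hc
      · rw [PySem.List.length_pySetD]; exact hh
      · rw [show i0 + 1 - 1 = i0 by ring,
          pv_getD_setD cache (i0+1) i0 _ _ (by omega) (by omega) (by omega), if_neg (by omega)]
        exact g5
      · rw [pv_getD_setD cache (i0+1) (i0+1) _ _ (by omega) (by omega) (by omega), if_pos rfl]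
      · rw [show i0 + 1 - 1 = i0 by ring,
          pv_getD_setD houses (i0+1) i0 _ _ (by omega) (by omega) (by omega), if_neg (by omega)]
        exact g7
      · rw [pv_getD_setD houses (i0+1) (i0+1) _ _ (by omega) (by omega) (by omega), if_pos rfl,
          hEmpty1, pv_contains_update_nil]
        exact g7
      · intro j hj
        rw [pv_getD_setD houses (i0+1) j _ _ (by omega) (by omega) (by omega), if_neg (by omega)]
        exact hE j (by omega)
    · rw [if_neg hcc,
        show circleRobStepB (p2, p, z2, z) m = (p, p2 + m, z, z2) from by
          simp [circleRobStepB, hcc]]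
      refine ih (i0+1) _ _ p (p2 + m) z z2 (by omega) hlen2 ?_ ?_ ?_ ?_ ?_ ?_ ?_
      · rw [PySem.List.length_pySetD]; exact hc
      · rw [PySem.List.length_pySetD]; exact hh
      · rw [show i0 + 1 - 1 = i0 by ring,
          pv_getD_setD cache (i0+1) i0 _ _ (by omega) (by omega) (by omega), if_neg (by omega)]
        exact g5
      · rw [pv_getD_setD cache (i0+1) (i0+1) _ _ (by omega) (by omega) (by omega), if_pos rfl]
      · rw [show i0 + 1 - 1 = i0 by ring,
          pv_getD_setD houses (i0+1) i0 _ _ (by omega) (by omega) (by omega), if_neg (by omega)]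
        exact g7
      · rw [pv_getD_setD houses (i0+1) (i0+1) _ _ (by omega) (by omega) (by omega), if_pos rfl,
          hEmpty1, pv_contains_add_ne _ _ (by omega), pv_contains_update_nil]
        exact g6
      · intro j hj
        rw [pv_getD_setD houses (i0+1) j _ _ (by omega) (by omega) (by omega), if_neg (by omega)]
        exact hE j (by omega)

-- the backtrace only reads table entries at indices ≤ k, so a write above k does not change it
theorem pv_trace_setD (c : List Int) (j v : Int) (hj0 : 0 ≤ j) (hj : j < c.length) :
    ∀ k : Nat, (k : Int) < j →
      circleRobTrace (PySem.List.pySetD c j v) k = circleRobTrace c k := by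
  intro k
  induction k using Nat.strong_induction_on with
  | _ k ih =>
    match k with
    | 0 => intro _; rfl
    | 1 => intro _; rfl
    | (n + 2) =>
      intro h
      have h2 : ((n : Int) + 2) < j := by push_cast at h; omega
      have e1 : PySem.List.pyGetD (PySem.List.pySetD c j v) ((n : Int) + 2) 0 =
          PySem.List.pyGetD c ((n : Int) + 2) 0 := by
        rw [pv_getD_setD c j ((n : Int) + 2) v 0 hj0 hj (by omega)]
        exact if_neg (by omega)
      have e2 : PySem.List.pyGetD (PySem.List.pySetD c j v) ((n : Int) + 1) 0 =
          PySem.List.pyGetD c ((n : Int) + 1) 0 := by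
        rw [pv_getD_setD c j ((n : Int) + 1) v 0 hj0 hj (by omega)]
        exact if_neg (by omega)
      show (if PySem.List.pyGetD (PySem.List.pySetD c j v) ((n : Int) + 2) 0 >
              PySem.List.pyGetD (PySem.List.pySetD c j v) ((n : Int) + 1) 0 then
              circleRobTrace (PySem.List.pySetD c j v) n
            else circleRobTrace (PySem.List.pySetD c j v) (n + 1)) =
           (if PySem.List.pyGetD c ((n : Int) + 2) 0 > PySem.List.pyGetD c ((n : Int) + 1) 0 then
              circleRobTrace c n
            else circleRobTrace c (n + 1))
      rw [e1, e2]
      split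
      · exact ih n (by omega) (by omega)
      · exact ih (n + 1) (by omega) (by push_cast; omega)

-- B-side loop invariant: filling the table and backtracing it tracks the same rolling state
theorem pv_tbl_inv (mid : List Int) :
    ∀ (k : Nat) (c : List Int) (p2 p : Int) (z2 z : Bool),
      1 ≤ k → k + mid.length < c.length →
      PySem.List.pyGetD c ((k : Int) - 1) 0 = p2 →
      PySem.List.pyGetD c (k : Int) 0 = p →
      circleRobTrace c (k - 1) = z2 →
      circleRobTrace c k = z →
      ((PySem.List.enumerate mid (k : Int)).foldl circleRobFill c).length = c.length ∧
      PySem.List.pyGetD ((PySem.List.enumerate mid (k : Int)).foldl circleRobFill c) ((k : Int) + mid.length - 1) 0 = (mid.foldl circleRobStepB (p2, p, z2, z)).1 ∧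
      PySem.List.pyGetD ((PySem.List.enumerate mid (k : Int)).foldl circleRobFill c) ((k : Int) + mid.length) 0 = (mid.foldl circleRobStepB (p2, p, z2, z)).2.1 ∧
      circleRobTrace ((PySem.List.enumerate mid (k : Int)).foldl circleRobFill c) (k + mid.length - 1) = (mid.foldl circleRobStepB (p2, p, z2, z)).2.2.1 := by
  induction mid with
  | nil =>
    intro k c p2 p z2 z h1 h2 g1 g2 g3 g4
    rw [PySem.List.enumerate_nil]
    simp only [List.foldl_nil, List.length_nil, Nat.cast_zero, add_zero]
    exact ⟨trivial, g1, g2, g3⟩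
  | cons m ms ih =>
    intro k c p2 p z2 z h1 h2 g1 g2 g3 g4
    have hklt : (k : Int) + 1 < (c.length : Int) := by
      rw [List.length_cons] at h2; omega
    rw [PySem.List.enumerate_cons]
    simp only [List.foldl_cons]
    rw [show circleRobFill c ((k : Int), m) =
          PySem.List.pySetD c ((k : Int) + 1) (max p (p2 + m)) from by
      simp only [circleRobFill]; rw [g1, g2]]
    have hidxI : (k : Int) + (((m :: ms : List Int).length : Nat) : Int) =
        ((k + 1 : Nat) : Int) + (ms.length : Int) := by
      rw [List.length_cons]; push_cast; ring
    have hidxN1 : k + (m :: ms : List Int).length - 1 = (k + 1) + ms.length - 1 := by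
      rw [List.length_cons]; omega
    rw [hidxI, hidxN1]
    have hlen' : (k + 1) + ms.length < (PySem.List.pySetD c ((k : Int) + 1) (max p (p2 + m))).length := by
      rw [PySem.List.length_pySetD]
      rw [List.length_cons] at h2; omega
    have hg1 : PySem.List.pyGetD (PySem.List.pySetD c ((k : Int) + 1) (max p (p2 + m))) (((k + 1 : Nat) : Int) - 1) 0 = p := by
      rw [show (((k + 1 : Nat) : Int) - 1) = (k : Int) from by push_cast; ring,
        pv_getD_setD c ((k : Int) + 1) (k : Int) _ _ (by omega) hklt (by omega), if_neg (by omega)]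
      exact g2
    have hg2 : PySem.List.pyGetD (PySem.List.pySetD c ((k : Int) + 1) (max p (p2 + m))) ((k + 1 : Nat) : Int) 0 = max p (p2 + m) := by
      rw [show (((k + 1 : Nat) : Int)) = (k : Int) + 1 from by push_cast; ring,
        pv_getD_setD c ((k : Int) + 1) ((k : Int) + 1) _ _ (by omega) hklt (by omega), if_pos rfl]
    have hg3 : circleRobTrace (PySem.List.pySetD c ((k : Int) + 1) (max p (p2 + m))) ((k + 1) - 1) = z := by
      rw [show (k + 1) - 1 = k from by omega,
        pv_trace_setD c ((k : Int) + 1) _ (by omega) hklt k (by omega)]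
      exact g4
    have hg4 : circleRobTrace (PySem.List.pySetD c ((k : Int) + 1) (max p (p2 + m))) (k + 1) =
        (if p ≥ p2 + m then z else z2) := by
      obtain ⟨n, hn⟩ : ∃ n, k = n + 1 := ⟨k - 1, by omega⟩
      subst hn
      have ea : PySem.List.pyGetD (PySem.List.pySetD c ((n : Int) + 1 + 1) (max p (p2 + m))) ((n : Int) + 2) 0 = max p (p2 + m) := by
        rw [pv_getD_setD c ((n : Int) + 1 + 1) ((n : Int) + 2) _ _ (by omega)
          (by push_cast at hklt ⊢; omega) (by omega)]
        exact if_pos (by ring)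
      have eb : PySem.List.pyGetD (PySem.List.pySetD c ((n : Int) + 1 + 1) (max p (p2 + m))) ((n : Int) + 1) 0 = p := by
        rw [pv_getD_setD c ((n : Int) + 1 + 1) ((n : Int) + 1) _ _ (by omega)
          (by push_cast at hklt ⊢; omega) (by omega), if_neg (by omega)]
        rw [show ((n : Int) + 1) = ((n + 1 : Nat) : Int) from by push_cast; ring]
        exact g2
      show (if PySem.List.pyGetD (PySem.List.pySetD c (((n + 1 : Nat) : Int) + 1) (max p (p2 + m))) ((n : Int) + 2) 0 >
              PySem.List.pyGetD (PySem.List.pySetD c (((n + 1 : Nat) : Int) + 1) (max p (p2 + m))) ((n : Int) + 1) 0 then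
              circleRobTrace (PySem.List.pySetD c (((n + 1 : Nat) : Int) + 1) (max p (p2 + m))) n
            else circleRobTrace (PySem.List.pySetD c (((n + 1 : Nat) : Int) + 1) (max p (p2 + m))) (n + 1)) =
           (if p ≥ p2 + m then z else z2)
      rw [show (((n + 1 : Nat) : Int) + 1) = ((n : Int) + 1 + 1) from by push_cast; ring]
      rw [ea, eb]
      by_cases hcc : p ≥ p2 + m
      · rw [if_pos hcc, if_neg (by rw [max_eq_left hcc]; omega),
          pv_trace_setD c _ _ (by omega) (by push_cast at hklt ⊢; omega) (n + 1) (by push_cast; omega)]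
        rw [show n + 1 = (n + 1 + 1) - 1 from by omega] at g4 ⊢
        exact g4
      · rw [if_neg hcc, if_pos (by rw [max_eq_right (by omega : p ≤ p2 + m)]; omega),
          pv_trace_setD c _ _ (by omega) (by push_cast at hklt ⊢; omega) n (by omega)]
        rw [show n = (n + 1) - 1 from rfl] at g3 ⊢
        exact g3
    rw [show ((k : Int) + 1) = ((k + 1 : Nat) : Int) from by push_cast; ring]
    by_cases hcc : p ≥ p2 + m
    · rw [show circleRobStepB (p2, p, z2, z) m = (p, p, z, z) from by
          simp [circleRobStepB, hcc]]
      have := ih (k + 1) (PySem.List.pySetD c ((k : Int) + 1) (max p (p2 + m))) p p z z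
        (by omega) hlen' hg1 (by rw [hg2]; exact max_eq_left hcc) hg3 (by rw [hg4, if_pos hcc])
      rw [PySem.List.length_pySetD] at this
      exact this
    · rw [show circleRobStepB (p2, p, z2, z) m = (p, p2 + m, z, z2) from by
          simp [circleRobStepB, hcc]]
      have := ih (k + 1) (PySem.List.pySetD c ((k : Int) + 1) (max p (p2 + m))) p (p2 + m) z z2
        (by omega) hlen' hg1 (by rw [hg2]; exact max_eq_right (by omega)) hg3 (by rw [hg4, if_neg hcc])
      rw [PySem.List.length_pySetD] at this
      exact this

theorem pv_slice_one_neg_one (x : Int) (ys : List Int) :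
    PySem.List.slice (x :: ys) (some 1) (some (-1)) = ys.dropLast := by
  simp [PySem.List.slice, List.dropLast_eq_take]

theorem pv_getD_setD_last (xs : List Int) (k : Int) (v : Int)
    (h0 : 0 ≤ k) (h : k.toNat + 1 = xs.length) :
    PySem.List.pyGetD (PySem.List.pySetD xs k v) (-1) 0 = v := by
  rw [PySem.List.pySetD_of_nonneg xs v h0]
  unfold PySem.List.pyGetD
  rw [PySem.List.pyGet?_neg_one, List.getLast?_eq_getElem?]
  simp [← h]

theorem pv_main_cons (x lastv : Int) (ms : List Int) :
    circleRob (x :: (ms ++ [lastv])) = circleRob_alt (x :: (ms ++ [lastv])) := by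
  have hlenN : ((x :: (ms ++ [lastv]) : List Int).length : Int) = (ms.length : Int) + 2 := by
    simp; ring
  have hlen' : (x :: (ms ++ [lastv]) : List Int).length = ms.length + 2 := by simp
  have hrepC : ∀ (j : Int), 0 ≤ j →
      PySem.List.pyGetD (List.replicate ((x :: (ms ++ [lastv]) : List Int).length + 1) (0:Int)) j 0 = 0 := by
    intro j hj
    rw [PySem.List.pyGetD_of_nonneg _ _ hj]
    rw [List.getD_eq_getElem?_getD, List.getElem?_replicate]
    split <;> rfl
  have hrepH : ∀ (j : Int), 0 ≤ j →
      PySem.List.pyGetD (List.replicate ((x :: (ms ++ [lastv]) : List Int).length + 1)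
        (PySem.Set.empty : PySem.Set Int)) j PySem.Set.empty = PySem.Set.empty := by
    intro j hj
    rw [PySem.List.pyGetD_of_nonneg _ _ hj]
    rw [List.getD_eq_getElem?_getD, List.getElem?_replicate]
    split <;> rfl
  have hrepB : ∀ (j : Int), 0 ≤ j →
      PySem.List.pyGetD (List.replicate ((x :: (ms ++ [lastv]) : List Int).length) (0:Int)) j 0 = 0 := by
    intro j hj
    rw [PySem.List.pyGetD_of_nonneg _ _ hj]
    rw [List.getD_eq_getElem?_getD, List.getElem?_replicate]
    split <;> rfl
  have hx0 : PySem.List.pyGetD (x :: (ms ++ [lastv])) 0 0 = x := by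
    rw [PySem.List.pyGetD_of_nonneg _ _ (le_refl (0:Int))]; rfl
  have hxlast : PySem.List.pyGetD (x :: (ms ++ [lastv])) (-1) 0 = lastv := by
    unfold PySem.List.pyGetD
    rw [show (x :: (ms ++ [lastv]) : List Int) = (x :: ms) ++ [lastv] from by simp,
      PySem.List.pyGet?_neg_one_append_singleton]
    rfl
  have hsl : PySem.List.slice (x :: (ms ++ [lastv])) (some 1) none = ms ++ [lastv] := by
    rw [show (1:Int) = ((1:Nat):Int) from rfl, PySem.List.slice_from_natCast]
    rfl
  have henum : PySem.List.enumerate (ms ++ [lastv]) 1 =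
      PySem.List.enumerate ms 1 ++ [((1 + (ms.length:Int)), lastv)] := by
    rw [PySem.List.enumerate_append, PySem.List.enumerate_cons, PySem.List.enumerate_nil]
  simp only [circleRob, circleRob_alt]
  rw [hx0, hxlast, hsl, henum, List.foldl_append, List.foldl_cons, List.foldl_nil,
    pv_slice_one_neg_one, List.dropLast_concat]
  rw [if_neg (by omega : ¬ (x :: (ms ++ [lastv]) : List Int).length = 1)]
  -- A side: rolling state via pv_loop_inv
  have keyA := pv_loop_inv ((x :: (ms ++ [lastv]) : List Int).length : Int) ms 1
      (PySem.List.pySetD (List.replicate ((x :: (ms ++ [lastv])).length + 1) (0:Int)) 1 x)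
      (PySem.List.pySetD (List.replicate ((x :: (ms ++ [lastv])).length + 1)
        (PySem.Set.empty : PySem.Set Int)) 1 (PySem.Set.add PySem.Set.empty 0))
      0 x false true (le_refl 1)
      (by rw [hlenN]; ring)
      (by rw [PySem.List.length_pySetD, List.length_replicate]; omega)
      (by rw [PySem.List.length_pySetD, List.length_replicate]; omega)
      (by rw [pv_getD_setD _ 1 (1-1) _ _ (by omega) (by simp; omega) (by omega),
            if_neg (by omega)]
          exact hrepC (1-1) (by omega))
      (by rw [pv_getD_setD _ 1 1 _ _ (by omega) (by simp; omega) (by omega), if_pos rfl])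
      (by rw [pv_getD_setD _ 1 (1-1) _ _ (by omega) (by simp; omega) (by omega),
            if_neg (by omega), hrepH (1-1) (by omega)]
          rfl)
      (by rw [pv_getD_setD _ 1 1 _ _ (by omega) (by simp; omega) (by omega), if_pos rfl]
          rfl)
      (by intro j hj
          rw [pv_getD_setD _ 1 j _ _ (by omega) (by simp; omega) (by omega),
            if_neg (by omega)]
          exact hrepH j (by omega))
  obtain ⟨L, G1, G2, G3⟩ := keyA
  -- B side: rolling state via pv_tbl_inv (k = 1)
  have keyB := pv_tbl_inv ms 1
      (PySem.List.pySetD (List.replicate ((x :: (ms ++ [lastv])).length) (0:Int)) 1 x)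
      0 x false true (le_refl 1)
      (by rw [PySem.List.length_pySetD, List.length_replicate]; omega)
      (by rw [show (((1:Nat):Int) - 1) = (0:Int) from by norm_num]
          rw [pv_getD_setD _ 1 0 _ _ (by omega) (by simp) (by omega), if_neg (by omega)]
          exact hrepB 0 (by omega))
      (by rw [show (((1:Nat):Int)) = (1:Int) from Nat.cast_one]
          rw [pv_getD_setD _ 1 1 _ _ (by omega) (by simp) (by omega), if_pos rfl])
      rfl rfl
  simp only [Nat.cast_one] at keyB
  obtain ⟨LB, H1, H2, H3⟩ := keyB
  -- final circular step of A
  rw [circleRobStep]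
  simp only
  rw [if_pos (by rw [hlenN]; ring : (1:Int) + (ms.length:Int) = ((x :: (ms ++ [lastv]) : List Int).length : Int) - 1)]
  rw [G1, G2, G3]
  -- rewrite B's final reads through the invariant
  rw [show (x :: (ms ++ [lastv]) : List Int).length - 2 = 1 + ms.length - 1 from by
    rw [hlen']; omega]
  rw [H3]
  rw [show ((x :: (ms ++ [lastv]) : List Int).length : Int) - 1 = (1:Int) + (ms.length : Int) from by
    rw [hlenN]; ring]
  rw [show ((x :: (ms ++ [lastv]) : List Int).length : Int) - 2 = (1:Int) + (ms.length : Int) - 1 from by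
    rw [hlenN]; ring]
  rw [H1, H2]
  by_cases hz : (ms.foldl circleRobStepB (0, x, false, true)).2.2.1 = true
  · rw [if_pos hz, if_pos hz]
    exact pv_getD_setD_last _ _ _ (by omega) (by rw [L]; omega)
  · rw [if_neg hz, if_neg hz]
    exact pv_getD_setD_last _ _ _ (by omega) (by rw [L]; omega)

-- ===== VERDICT (by name: the statement is the Claim_ definition above) =====
theorem circleRob_spec : Claim_equal_circleRob := by
  intro nums _ hne
  unfold Spec_circleRob
  match nums, hne with
  | [x], _ => rfl
  | x :: r :: rs, _ =>
    have h := pv_main_cons x ((r :: rs : List Int).getLast (by simp)) (r :: rs).dropLast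
    rwa [List.dropLast_append_getLast (by simp)] at h
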